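-- pv_equiv track=rewrite | github.com/rpycgo/Algorithm | BOJ/Python/Binary Search/1981.py | bfs
-- ===== SOURCE A (Python) =====
-- from collections import deque
--
-- def bfs(n, board, low_limit, high_limit):
--     if not (low_limit <= board[0][0] <= high_limit):
--         return False
--
--     queue = deque([(0, 0)])
--     visited = [[False] * n for _ in range(n)]
--     visited[0][0] = True
--
--     while queue:
--         r, c = queue.popleft()
--
--         if r == n - 1 and c == n - 1:
--             return True
--
--         dr = [0, 0, 1, -1]
--         dc = [1, -1, 0, 0]
--
--         for i in range(4):
--             nr = r + dr[i]
--             nc = c + dc[i]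
--
--             if 0 <= nr < n and 0 <= nc < n and not visited[nr][nc]:
--                 if low_limit <= board[nr][nc] <= high_limit:
--                     visited[nr][nc] = True
--                     queue.append((nr, nc))
--
--     return False
-- ===== SOURCE B (Python) =====
-- def bfs(n, board, low_limit, high_limit):
--     if not (low_limit <= board[0][0] <= high_limit):
--         return False
--     reach = {(0, 0)}
--     for _ in range(n * n):
--         frontier = [
--             (r + dr, c + dc)
--             for (r, c) in reach
--             for (dr, dc) in ((0, 1), (0, -1), (1, 0), (-1, 0))
--             if 0 <= r + dr < n and 0 <= c + dc < n
--             and (r + dr, c + dc) not in reach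
--             and low_limit <= board[r + dr][c + dc] <= high_limit
--         ]
--         if not frontier:
--             break
--         reach.update(frontier)
--     return (n - 1, n - 1) in reach
-- ===== Notes on version B (the rewrite author's own statement) =====
-- stated objective: alternative
-- what changed: Replaces the FIFO-queue BFS with a mutable visited matrix by round-based set saturation: each round a comprehension collects every new in-range cell adjacent to the reached set, stopping when a round adds nothing, and the answer is membership of the goal corner in the saturated set.
-- outside the precondition, e.g. on bfs(2, [[5, 99], [99]], 0, 10): A returns False, B returns False
import Mathlib
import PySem

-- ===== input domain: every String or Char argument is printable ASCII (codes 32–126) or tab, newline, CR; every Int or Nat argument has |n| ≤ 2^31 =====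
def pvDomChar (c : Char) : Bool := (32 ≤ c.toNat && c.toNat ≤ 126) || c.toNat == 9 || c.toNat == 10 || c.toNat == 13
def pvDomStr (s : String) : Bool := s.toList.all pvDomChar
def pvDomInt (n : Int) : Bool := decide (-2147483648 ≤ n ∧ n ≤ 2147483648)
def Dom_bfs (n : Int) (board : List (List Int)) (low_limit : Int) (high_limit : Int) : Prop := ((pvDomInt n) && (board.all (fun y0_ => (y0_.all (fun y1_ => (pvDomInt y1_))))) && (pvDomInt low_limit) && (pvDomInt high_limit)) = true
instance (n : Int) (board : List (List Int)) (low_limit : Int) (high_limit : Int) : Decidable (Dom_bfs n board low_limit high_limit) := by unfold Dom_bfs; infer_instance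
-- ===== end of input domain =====

-- B replaces the FIFO-queue BFS by round-based set saturation (alternative decomposition, not claimed faster);
-- both ports read board cells through the shared accessor pvCell and the shared direction list pvDirs.

def pvCell (board : List (List Int)) (r c : Int) : Int :=
  PySem.List.pyGetD (PySem.List.pyGetD board r []) c 0

def pvDirs : List (Int × Int) := [(0, 1), (0, -1), (1, 0), (-1, 0)]

-- ===== PORT A =====
-- visited[r][c] read / write (indices are nonnegative whenever A touches them)
def bfsVGet (v : List (List Bool)) (r c : Int) : Bool :=
  PySem.List.pyGetD (PySem.List.pyGetD v r []) c false

def bfsVSet (v : List (List Bool)) (r c : Int) : List (List Bool) :=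
  PySem.List.pySetD v r (PySem.List.pySetD (PySem.List.pyGetD v r []) c true)

-- the body of A's `for i in range(4)` loop, one direction at a time
def bfsRelax (n : Int) (board : List (List Int)) (low_limit high_limit : Int) (r c : Int)
    (s : List (List Bool) × List (Int × Int)) (d : Int × Int) : List (List Bool) × List (Int × Int) :=
  let nr := r + d.1
  let nc := c + d.2
  if 0 ≤ nr ∧ nr < n ∧ 0 ≤ nc ∧ nc < n ∧ bfsVGet s.1 nr nc = false then
    if low_limit ≤ pvCell board nr nc ∧ pvCell board nr nc ≤ high_limit then
      (bfsVSet s.1 nr nc, s.2 ++ [(nr, nc)])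
    else s
  else s

-- A's `while queue` loop; the fuel only makes it total (n²+1 pops always suffice, proved below)
def bfsLoopA (n : Int) (board : List (List Int)) (low_limit high_limit : Int) :
    Nat → List (Int × Int) → List (List Bool) → Bool
  | 0, _, _ => false
  | fuel + 1, queue, visited =>
    match queue with
    | [] => false
    | (r, c) :: rest =>
      if r = n - 1 ∧ c = n - 1 then true
      else
        let s := pvDirs.foldl (bfsRelax n board low_limit high_limit r c) (visited, rest)
        bfsLoopA n board low_limit high_limit fuel s.2 s.1

def bfs (n : Int) (board : List (List Int)) (low_limit : Int) (high_limit : Int) : Bool :=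
  if low_limit ≤ pvCell board 0 0 ∧ pvCell board 0 0 ≤ high_limit then
    bfsLoopA n board low_limit high_limit (n.toNat * n.toNat + 1) [(0, 0)]
      (bfsVSet (List.replicate n.toNat (List.replicate n.toNat false)) 0 0)
  else false

-- ===== PORT B =====
-- the frontier comprehension of Source B: all new in-range cells adjacent to the reached set
def altFrontier (n : Int) (board : List (List Int)) (low_limit high_limit : Int)
    (reach : PySem.Set (Int × Int)) : List (Int × Int) :=
  reach.flatMap (fun p =>
    (pvDirs.map (fun d => (p.1 + d.1, p.2 + d.2))).filter (fun q =>
      decide (0 ≤ q.1 ∧ q.1 < n ∧ 0 ≤ q.2 ∧ q.2 < n) &&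
      !(PySem.Set.contains reach q) &&
      decide (low_limit ≤ pvCell board q.1 q.2 ∧ pvCell board q.1 q.2 ≤ high_limit)))

-- Source B's `for _ in range(n*n)` loop with its `break` on an empty frontier
def altLoop (n : Int) (board : List (List Int)) (low_limit high_limit : Int) :
    Nat → PySem.Set (Int × Int) → PySem.Set (Int × Int)
  | 0, reach => reach
  | k + 1, reach =>
    let f := altFrontier n board low_limit high_limit reach
    if f.isEmpty then reach
    else altLoop n board low_limit high_limit k (PySem.Set.update reach f)

def bfs_alt (n : Int) (board : List (List Int)) (low_limit : Int) (high_limit : Int) : Bool :=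
  if low_limit ≤ pvCell board 0 0 ∧ pvCell board 0 0 ≤ high_limit then
    PySem.Set.contains
      (altLoop n board low_limit high_limit (n * n).toNat (PySem.Set.ofList [((0 : Int), (0 : Int))]))
      (n - 1, n - 1)
  else false

-- ===== PRECONDITION & SPEC =====
-- Pre_ admits any input whose start cell exists and is out of range (A returns False at once) and
-- otherwise requires a genuine n×n board (n ≥ 1, at least n rows each of length ≥ n): on the excluded
-- inputs A raises IndexError, except for ragged boards whose missing cells the search never touches.
def Pre_bfs (n : Int) (board : List (List Int)) (low_limit : Int) (high_limit : Int) : Prop :=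
  1 ≤ board.length ∧ 1 ≤ (board.getD 0 []).length ∧
  ((low_limit ≤ pvCell board 0 0 ∧ pvCell board 0 0 ≤ high_limit) →
    (1 ≤ n ∧ n.toNat ≤ board.length ∧ ∀ row ∈ board.take n.toNat, n.toNat ≤ row.length))

instance (n : Int) (board : List (List Int)) (low_limit : Int) (high_limit : Int) : Decidable (Pre_bfs n board low_limit high_limit) := by unfold Pre_bfs; infer_instance

def pvWitness_bfs : Int × List (List Int) × Int × Int := (2, [[1, 9], [2, 3]], 0, 5)

def Spec_bfs (n : Int) (board : List (List Int)) (low_limit : Int) (high_limit : Int) (out : Bool) : Prop := out = bfs_alt n board low_limit high_limit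
instance (n : Int) (board : List (List Int)) (low_limit : Int) (high_limit : Int) (out : Bool) : Decidable (Spec_bfs n board low_limit high_limit out) := by unfold Spec_bfs; infer_instance

-- ===== CLAIM (what is proved, stated in full; the proofs are below) =====
def Claim_equal_bfs : Prop := ∀ (n : Int) (board : List (List Int)) (low_limit : Int) (high_limit : Int), Dom_bfs n board low_limit high_limit → Pre_bfs n board low_limit high_limit → Spec_bfs n board low_limit high_limit (bfs n board low_limit high_limit)

-- ===== LEMMAS AND PROOFS =====

-- the common abstraction both ports are proved against: reachability through in-range cells
def pvInb (n : Int) (p : Int × Int) : Prop := 0 ≤ p.1 ∧ p.1 < n ∧ 0 ≤ p.2 ∧ p.2 < n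

def pvOk (n : Int) (board : List (List Int)) (lo hi : Int) (p : Int × Int) : Prop :=
  pvInb n p ∧ lo ≤ pvCell board p.1 p.2 ∧ pvCell board p.1 p.2 ≤ hi

def pvAdj (p q : Int × Int) : Prop := ∃ d ∈ pvDirs, q = (p.1 + d.1, p.2 + d.2)

def pvStep (n : Int) (board : List (List Int)) (lo hi : Int) (p q : Int × Int) : Prop :=
  pvAdj p q ∧ pvOk n board lo hi q

def pvReach (n : Int) (board : List (List Int)) (lo hi : Int) (p : Int × Int) : Prop :=
  Relation.ReflTransGen (pvStep n board lo hi) (0, 0) p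

-- visited-matrix abstraction
def pvV (v : List (List Bool)) (p : Int × Int) : Prop :=
  0 ≤ p.1 ∧ 0 ≤ p.2 ∧ bfsVGet v p.1 p.2 = true

def pvShape (m : Nat) (v : List (List Bool)) : Prop := v.length = m ∧ ∀ row ∈ v, row.length = m

def pvFC (v : List (List Bool)) : Nat := (v.map (fun row => row.count false)).sum

theorem pv_getD_set_self {α : Type} (l : List α) (j : Nat) (h : j < l.length) (a d : α) :
    (l.set j a).getD j d = a := by
  rw [List.getD_eq_getElem _ _ (by simpa using h)]
  simp

theorem pv_getD_set_ne {α : Type} (l : List α) (j k : Nat) (hne : k ≠ j) (a d : α) :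
    (l.set j a).getD k d = l.getD k d := by
  by_cases hk : k < l.length
  · rw [List.getD_eq_getElem _ _ (by simpa using hk), List.getD_eq_getElem _ _ hk]
    simp [Ne.symm hne]
  · rw [List.getD_eq_default _ _ (by simpa using hk), List.getD_eq_default _ _ (by omega)]

theorem pv_count_set_false (l : List Bool) (j : Nat) (h : j < l.length)
    (hf : l.getD j false = false) : (l.set j true).count false + 1 = l.count false := by
  have hl : l = l.take j ++ l[j] :: l.drop (j + 1) := by
    rw [List.getElem_cons_drop, List.take_append_drop]
  have hset : l.set j true = l.take j ++ true :: l.drop (j + 1) := by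
    rw [List.set_eq_take_append_cons_drop]; simp [h]
  have hgj : l[j] = false := by
    rw [List.getD_eq_getElem _ _ h] at hf; exact hf
  rw [hset]; conv_rhs => rw [hl]
  simp [List.count_append, hgj]
  omega

theorem pv_sum_set (l : List Nat) (i : Nat) (a : Nat) (h : i < l.length) :
    (l.set i a).sum + l.getD i 0 = l.sum + a := by
  have hl : l = l.take i ++ l[i] :: l.drop (i + 1) := by
    rw [List.getElem_cons_drop, List.take_append_drop]
  have hset : l.set i a = l.take i ++ a :: l.drop (i + 1) := by
    rw [List.set_eq_take_append_cons_drop]; simp [h]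
  have hg : l.getD i 0 = l[i] := List.getD_eq_getElem _ _ h
  rw [hset, hg]; conv_rhs => rw [hl]
  rw [List.sum_append, List.sum_append, List.sum_cons, List.sum_cons]
  omega

theorem pv_mark_props (m : Nat) (v : List (List Bool)) (r c : Int)
    (hS : pvShape m v) (hr0 : 0 ≤ r) (hrn : r.toNat < m) (hc0 : 0 ≤ c) (hcn : c.toNat < m)
    (hfalse : bfsVGet v r c = false) :
    pvShape m (bfsVSet v r c)
    ∧ pvFC (bfsVSet v r c) + 1 = pvFC v
    ∧ pvV (bfsVSet v r c) (r, c)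
    ∧ (∀ p : Int × Int, pvV v p → pvV (bfsVSet v r c) p)
    ∧ (∀ p : Int × Int, pvV (bfsVSet v r c) p → pvV v p ∨ p = (r, c)) := by
  obtain ⟨hlen, hrows⟩ := hS
  set i := r.toNat with hi
  set j := c.toNat with hj
  have hiv : i < v.length := by omega
  have hrow : v.getD i [] = v[i] := List.getD_eq_getElem _ _ hiv
  have hrowlen : v[i].length = m := hrows _ (List.getElem_mem hiv)
  have hjlen : j < (v.getD i []).length := by rw [hrow]; omega
  have hvset : bfsVSet v r c = v.set i ((v.getD i []).set j true) := by
    rw [bfsVSet, PySem.List.pyGetD_of_nonneg _ _ hr0, PySem.List.pySetD_of_nonneg _ _ hc0,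
      PySem.List.pySetD_of_nonneg _ _ hr0]
  have hvget : ∀ (w : List (List Bool)) (p : Int × Int), 0 ≤ p.1 → 0 ≤ p.2 →
      bfsVGet w p.1 p.2 = (w.getD p.1.toNat []).getD p.2.toNat false := by
    intro w p h1 h2
    rw [bfsVGet, PySem.List.pyGetD_of_nonneg _ _ h1, PySem.List.pyGetD_of_nonneg _ _ h2]
  have hfalse' : (v.getD i []).getD j false = false := by
    rw [← hvget v (r, c) hr0 hc0]; exact hfalse
  have hget_self : (bfsVSet v r c).getD i [] = (v.getD i []).set j true := by
    rw [hvset, pv_getD_set_self _ _ (by omega)]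
  have hget_ne : ∀ k : Nat, k ≠ i → (bfsVSet v r c).getD k [] = v.getD k [] := by
    intro k hk; rw [hvset, pv_getD_set_ne _ _ _ hk]
  refine ⟨⟨?_, ?_⟩, ?_, ?_, ?_, ?_⟩
  · rw [hvset]; simpa using hlen
  · intro row hmem
    rw [hvset] at hmem
    rw [List.mem_iff_getElem] at hmem
    obtain ⟨k, hk, hkeq⟩ := hmem
    simp only [List.length_set] at hk
    rw [List.getElem_set] at hkeq
    subst hkeq
    by_cases hki : i = k
    · simp only [if_pos hki, List.length_set]
      rw [hrow, hrowlen]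
    · simp only [if_neg hki]
      exact hrows _ (List.getElem_mem hk)
  · -- count
    rw [pvFC, pvFC, hvset, List.map_set]
    have hs := pv_sum_set (v.map (fun row => row.count false)) i
      (((v.getD i []).set j true).count false) (by simpa using hiv)
    have hgd : (v.map fun row => row.count false).getD i 0 = (v.getD i []).count false := by
      rw [List.getD_eq_getElem _ _ (by simpa using hiv), List.getElem_map, hrow]
    rw [hgd] at hs
    have hc := pv_count_set_false (v.getD i []) j hjlen hfalse'
    omega
  · -- marked is visited
    refine ⟨hr0, hc0, ?_⟩
    rw [hvget _ (r, c) hr0 hc0]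
    simp only [← hi, ← hj, hget_self]
    exact pv_getD_set_self _ _ hjlen _ _
  · -- monotone
    rintro ⟨a, b⟩ ⟨ha, hb, hv⟩
    refine ⟨ha, hb, ?_⟩
    rw [hvget _ (a, b) ha hb] at hv ⊢
    by_cases hai : a.toNat = i
    · rw [hai, hget_self]
      by_cases hbj : b.toNat = j
      · rw [hbj]; exact pv_getD_set_self _ _ hjlen _ _
      · rw [pv_getD_set_ne _ _ _ hbj]; rw [hai] at hv; exact hv
    · rw [hget_ne _ hai]; exact hv
  · -- new cells
    rintro ⟨a, b⟩ ⟨ha, hb, hv⟩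
    rw [hvget _ (a, b) ha hb] at hv
    by_cases hai : a.toNat = i
    · by_cases hbj : b.toNat = j
      · right
        have : a = r := by omega
        have : b = c := by omega
        simp_all
      · left
        refine ⟨ha, hb, ?_⟩
        rw [hvget _ (a, b) ha hb]
        rw [hai, hget_self, pv_getD_set_ne _ _ _ hbj] at hv
        rw [hai]; exact hv
    · left
      refine ⟨ha, hb, ?_⟩
      rw [hvget _ (a, b) ha hb, ← hget_ne _ hai]; exact hv

theorem pv_relax_fold (n : Int) (board : List (List Int)) (lo hi : Int) (r c : Int)
    (ds : List (Int × Int)) (v : List (List Bool)) (q : List (Int × Int))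
    (hsub : ∀ d ∈ ds, d ∈ pvDirs)
    (hS : pvShape n.toNat v)
    (hRp : pvReach n board lo hi (r, c)) :
    pvShape n.toNat (ds.foldl (bfsRelax n board lo hi r c) (v, q)).1
    ∧ pvFC (ds.foldl (bfsRelax n board lo hi r c) (v, q)).1
        + (ds.foldl (bfsRelax n board lo hi r c) (v, q)).2.length = pvFC v + q.length
    ∧ (∀ p, pvV v p → pvV (ds.foldl (bfsRelax n board lo hi r c) (v, q)).1 p)
    ∧ (∀ p, pvV (ds.foldl (bfsRelax n board lo hi r c) (v, q)).1 p →
        pvV v p ∨ p ∈ (ds.foldl (bfsRelax n board lo hi r c) (v, q)).2)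
    ∧ (∀ p ∈ (ds.foldl (bfsRelax n board lo hi r c) (v, q)).2,
        p ∈ q ∨ (pvV (ds.foldl (bfsRelax n board lo hi r c) (v, q)).1 p
          ∧ pvInb n p ∧ pvReach n board lo hi p))
    ∧ (∀ p ∈ q, p ∈ (ds.foldl (bfsRelax n board lo hi r c) (v, q)).2)
    ∧ (∀ d ∈ ds, pvOk n board lo hi (r + d.1, c + d.2) →
        pvV (ds.foldl (bfsRelax n board lo hi r c) (v, q)).1 (r + d.1, c + d.2)) := by
  induction ds generalizing v q with
  | nil =>
    refine ⟨hS, rfl, fun p h => h, fun p h => Or.inl h, fun p h => Or.inl h, fun p h => h, ?_⟩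
    intro d hd; exact absurd hd (List.not_mem_nil)
  | cons d ds ih =>
    have hsub' : ∀ d' ∈ ds, d' ∈ pvDirs := fun d' hd' => hsub d' (List.mem_cons_of_mem _ hd')
    simp only [List.foldl_cons]
    by_cases hout : 0 ≤ r + d.1 ∧ r + d.1 < n ∧ 0 ≤ c + d.2 ∧ c + d.2 < n
        ∧ bfsVGet v (r + d.1) (c + d.2) = false
    · by_cases hin : lo ≤ pvCell board (r + d.1) (c + d.2)
          ∧ pvCell board (r + d.1) (c + d.2) ≤ hi
      · -- the cell is marked and enqueued
        have hstep : bfsRelax n board lo hi r c (v, q) d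
            = (bfsVSet v (r + d.1) (c + d.2), q ++ [(r + d.1, c + d.2)]) := by
          simp only [bfsRelax, if_pos hout, if_pos hin]
        obtain ⟨h1, h2, h3, h4, h5⟩ := pv_mark_props n.toNat v (r + d.1) (c + d.2) hS
          hout.1 (by omega) hout.2.2.1 (by omega) hout.2.2.2.2
        rw [hstep]
        obtain ⟨i1, i2, i3, i4, i5, i6, i7⟩ := ih _ _ hsub' h1
        have hndV : pvV (ds.foldl (bfsRelax n board lo hi r c)
            (bfsVSet v (r + d.1) (c + d.2), q ++ [(r + d.1, c + d.2)])).1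
            (r + d.1, c + d.2) := i3 _ h3
        have hndReach : pvReach n board lo hi (r + d.1, c + d.2) := by
          refine Relation.ReflTransGen.tail hRp ⟨⟨d, hsub d List.mem_cons_self, rfl⟩, ?_, hin⟩
          exact ⟨hout.1, hout.2.1, hout.2.2.1, hout.2.2.2.1⟩
        refine ⟨i1, by simp at i2 ⊢; omega, fun p hp => i3 p (h4 p hp), ?_, ?_, ?_, ?_⟩
        · intro p hp
          rcases i4 p hp with hv | hq
          · rcases h5 p hv with hv' | rfl
            · exact Or.inl hv'
            · exact Or.inr (i6 _ (by simp))
          · exact Or.inr hq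
        · intro p hp
          rcases i5 p hp with hq | hgood
          · rcases List.mem_append.mp hq with hq' | hq'
            · exact Or.inl hq'
            · simp at hq'; subst hq'
              exact Or.inr ⟨hndV, ⟨hout.1, hout.2.1, hout.2.2.1, hout.2.2.2.1⟩, hndReach⟩
          · exact Or.inr hgood
        · intro p hp; exact i6 p (List.mem_append.mpr (Or.inl hp))
        · intro d' hd' hok
          rcases List.mem_cons.mp hd' with rfl | hd''
          · exact hndV
          · exact i7 d' hd'' hok
      · -- out of value range: state unchanged
        have hstep : bfsRelax n board lo hi r c (v, q) d = (v, q) := by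
          simp only [bfsRelax, if_pos hout, if_neg hin]
        rw [hstep]
        obtain ⟨i1, i2, i3, i4, i5, i6, i7⟩ := ih _ _ hsub' hS
        refine ⟨i1, i2, i3, i4, i5, i6, ?_⟩
        intro d' hd' hok
        rcases List.mem_cons.mp hd' with rfl | hd''
        · exact absurd hok.2 hin
        · exact i7 d' hd'' hok
    · -- bounds fail or already visited: state unchanged
      have hstep : bfsRelax n board lo hi r c (v, q) d = (v, q) := by
        simp only [bfsRelax, if_neg hout]
      rw [hstep]
      obtain ⟨i1, i2, i3, i4, i5, i6, i7⟩ := ih _ _ hsub' hS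
      refine ⟨i1, i2, i3, i4, i5, i6, ?_⟩
      intro d' hd' hok
      rcases List.mem_cons.mp hd' with heq | hd''
      · subst heq
        have hb := hok.1
        have hvis : bfsVGet v (r + d'.1) (c + d'.2) = true := by
          rcases Bool.eq_false_or_eq_true (bfsVGet v (r + d'.1) (c + d'.2)) with ht | hf
          · exact ht
          · exact absurd ⟨hb.1, hb.2.1, hb.2.2.1, hb.2.2.2, hf⟩ hout
        exact i3 _ ⟨hb.1, hb.2.2.1, hvis⟩
      · exact i7 d' hd'' hok


theorem pv_noreach (n : Int) (board : List (List Int)) (lo hi : Int) (v : List (List Bool))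
    (hstart : pvV v (0, 0))
    (hcl : ∀ p, pvV v p → ¬(p.1 = n - 1 ∧ p.2 = n - 1)
      ∧ ∀ p', pvStep n board lo hi p p' → pvV v p') :
    ¬ pvReach n board lo hi (n - 1, n - 1) := by
  intro hr
  have hall : ∀ p, pvReach n board lo hi p → pvV v p := by
    intro p hp
    induction hp with
    | refl => exact hstart
    | tail hab hbc ihab => exact (hcl _ ihab).2 _ hbc
  exact (hcl _ (hall _ hr)).1 ⟨rfl, rfl⟩

theorem pv_loopA (n : Int) (board : List (List Int)) (lo hi : Int) :
    ∀ (fuel : Nat) (q : List (Int × Int)) (v : List (List Bool)),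
    pvShape n.toNat v →
    (∀ p ∈ q, pvInb n p ∧ pvV v p ∧ pvReach n board lo hi p) →
    (∀ p, pvV v p → pvReach n board lo hi p) →
    pvV v (0, 0) →
    (∀ p, pvV v p → p ∈ q ∨ (¬(p.1 = n - 1 ∧ p.2 = n - 1)
      ∧ ∀ p', pvStep n board lo hi p p' → pvV v p')) →
    pvFC v + q.length ≤ fuel →
    (bfsLoopA n board lo hi fuel q v = true ↔ pvReach n board lo hi (n - 1, n - 1)) := by
  intro fuel
  induction fuel with
  | zero =>
    intro q v hS hq hVR hstart hcl hfuel
    have hqnil : q = [] := by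
      rcases q with _ | ⟨p, rest⟩
      · rfl
      · simp at hfuel
    subst hqnil
    simp only [bfsLoopA, Bool.false_eq_true, false_iff]
    exact pv_noreach n board lo hi v hstart
      (fun p hp => (hcl p hp).resolve_left (List.not_mem_nil))
  | succ fuel ih =>
    intro q v hS hq hVR hstart hcl hfuel
    rcases q with _ | ⟨⟨r, c⟩, rest⟩
    · simp only [bfsLoopA, Bool.false_eq_true, false_iff]
      exact pv_noreach n board lo hi v hstart
        (fun p hp => (hcl p hp).resolve_left (List.not_mem_nil))
    · by_cases hgoal : r = n - 1 ∧ c = n - 1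
      · simp only [bfsLoopA, if_pos hgoal, true_iff]
        have := (hq _ List.mem_cons_self).2.2
        rwa [hgoal.1, hgoal.2] at this
      · simp only [bfsLoopA, if_neg hgoal]
        have hRp : pvReach n board lo hi (r, c) := (hq _ List.mem_cons_self).2.2
        obtain ⟨i1, i2, i3, i4, i5, i6, i7⟩ :=
          pv_relax_fold n board lo hi r c pvDirs v rest (fun d hd => hd) hS hRp
        have hq' : ∀ p ∈ (pvDirs.foldl (bfsRelax n board lo hi r c) (v, rest)).2,
            pvInb n p ∧ pvV (pvDirs.foldl (bfsRelax n board lo hi r c) (v, rest)).1 p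
            ∧ pvReach n board lo hi p := by
          intro p hp
          rcases i5 p hp with hrest | ⟨hv, hinb, hre⟩
          · obtain ⟨ha, hb, hc⟩ := hq p (List.mem_cons_of_mem _ hrest)
            exact ⟨ha, i3 p hb, hc⟩
          · exact ⟨hinb, hv, hre⟩
        refine ih _ _ i1 hq' ?_ (i3 _ hstart) ?_ ?_
        · intro p hp
          rcases i4 p hp with hv | hs
          · exact hVR p hv
          · exact (hq' p hs).2.2
        · intro p hp
          rcases i4 p hp with hv | hs
          · rcases hcl p hv with hmem | ⟨hne, hsuc⟩
            · rcases List.mem_cons.mp hmem with heq | hrest'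
              · subst heq
                refine Or.inr ⟨hgoal, ?_⟩
                rintro p' ⟨⟨d, hd, rfl⟩, hok⟩
                exact i7 d hd hok
              · exact Or.inl (i6 _ hrest')
            · exact Or.inr ⟨hne, fun p' hs' => i3 _ (hsuc p' hs')⟩
          · exact Or.inl hs
        · simp only [List.length_cons] at hfuel
          omega

theorem pv_repl_get (m : Nat) (a b : Nat) :
    ((List.replicate m (List.replicate m false)).getD a []).getD b false = false := by
  by_cases ha : a < m
  · have houter : (List.replicate m (List.replicate m false)).getD a [] = List.replicate m false := by
      rw [List.getD_eq_getElem _ _ (by simpa using ha), List.getElem_replicate]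
    rw [houter]
    by_cases hb : b < m
    · rw [List.getD_eq_getElem _ _ (by simpa using hb), List.getElem_replicate]
    · rw [List.getD_eq_default _ _ (by simpa using hb)]
  · have houter : (List.replicate m (List.replicate m false)).getD a [] = [] :=
      List.getD_eq_default _ _ (by simpa using ha)
    rw [houter]
    rfl

theorem pv_repl_fc (m : Nat) : pvFC (List.replicate m (List.replicate m false)) = m * m := by
  rw [pvFC, List.map_replicate, List.count_replicate, List.sum_replicate]
  simp

theorem pv_bfsA (n : Int) (board : List (List Int)) (lo hi : Int) (hn : 1 ≤ n)
    (hok : lo ≤ pvCell board 0 0 ∧ pvCell board 0 0 ≤ hi) :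
    (bfs n board lo hi = true ↔ pvReach n board lo hi (n - 1, n - 1)) := by
  rw [bfs, if_pos hok]
  have hm : 0 < n.toNat := by omega
  have hSrepl : pvShape n.toNat (List.replicate n.toNat (List.replicate n.toNat false)) := by
    constructor
    · simp
    · intro row hrow
      simp [List.eq_of_mem_replicate hrow]
  have hfalse : bfsVGet (List.replicate n.toNat (List.replicate n.toNat false)) 0 0 = false := by
    rw [bfsVGet, PySem.List.pyGetD_of_nonneg _ _ le_rfl, PySem.List.pyGetD_of_nonneg _ _ le_rfl]
    exact pv_repl_get n.toNat _ _
  obtain ⟨h1, h2, h3, h4, h5⟩ := pv_mark_props n.toNat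
    (List.replicate n.toNat (List.replicate n.toNat false)) 0 0 hSrepl le_rfl
    (by simpa using hm) le_rfl (by simpa using hm) hfalse
  have hreplV : ∀ p : Int × Int, ¬ pvV (List.replicate n.toNat (List.replicate n.toNat false)) p := by
    rintro ⟨a, b⟩ ⟨ha, hb, hv⟩
    rw [bfsVGet, PySem.List.pyGetD_of_nonneg _ _ ha, PySem.List.pyGetD_of_nonneg _ _ hb,
      pv_repl_get] at hv
    exact Bool.false_ne_true hv
  have honly : ∀ p, pvV (bfsVSet (List.replicate n.toNat (List.replicate n.toNat false)) 0 0) p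
      → p = ((0 : Int), (0 : Int)) := by
    intro p hp
    rcases h5 p hp with hv | rfl
    · exact absurd hv (hreplV p)
    · rfl
  refine pv_loopA n board lo hi (n.toNat * n.toNat + 1) [(0, 0)]
    (bfsVSet (List.replicate n.toNat (List.replicate n.toNat false)) 0 0) h1 ?_ ?_ h3 ?_ ?_
  · intro p hp
    rcases List.mem_singleton.mp hp with rfl
    exact ⟨⟨le_rfl, by omega, le_rfl, by omega⟩, h3, Relation.ReflTransGen.refl⟩
  · intro p hp
    rw [honly p hp]
    exact Relation.ReflTransGen.refl
  · intro p hp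
    exact Or.inl (by rw [honly p hp]; exact List.mem_singleton.mpr rfl)
  · have := pv_repl_fc n.toNat
    simp only [List.length_singleton]
    omega

theorem pv_frontier_mem (n : Int) (board : List (List Int)) (lo hi : Int)
    (reach : PySem.Set (Int × Int)) (q : Int × Int) :
    q ∈ altFrontier n board lo hi reach ↔
    (∃ p ∈ reach, pvAdj p q) ∧ q ∉ reach ∧ pvOk n board lo hi q := by
  simp only [altFrontier, List.mem_flatMap, List.mem_filter, List.mem_map,
    Bool.and_eq_true, decide_eq_true_eq, Bool.not_eq_true']
  constructor
  · rintro ⟨p, hp, ⟨d, hd, hdq⟩, ⟨hb, hnc⟩, hrange⟩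
    refine ⟨⟨p, hp, ⟨d, hd, hdq.symm⟩⟩, ?_, ⟨⟨hb.1, hb.2.1, hb.2.2.1, hb.2.2.2⟩, hrange⟩⟩
    intro hmem
    rw [← PySem.Set.contains_iff reach q] at hmem
    rw [hnc] at hmem
    exact Bool.false_ne_true hmem
  · rintro ⟨⟨p, hp, ⟨d, hd, hdq⟩⟩, hnm, ⟨hb, hrange⟩⟩
    refine ⟨p, hp, ⟨d, hd, hdq.symm⟩, ⟨⟨hb.1, hb.2.1, hb.2.2.1, hb.2.2.2⟩, ?_⟩, hrange⟩
    rcases Bool.eq_false_or_eq_true (reach.contains q) with ht | hf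
    · exact absurd ((PySem.Set.contains_iff reach q).mp ht) hnm
    · exact hf

theorem pv_card_le (n : Int) (l : List (Int × Int)) (hnd : l.Nodup)
    (hinb : ∀ p ∈ l, pvInb n p) : l.length ≤ n.toNat * n.toNat := by
  classical
  have hsub : l.toFinset ⊆ Finset.Ico (0 : Int) n ×ˢ Finset.Ico (0 : Int) n := by
    intro p hp
    obtain ⟨h1, h2, h3, h4⟩ := hinb p (List.mem_toFinset.mp hp)
    rw [Finset.mem_product, Finset.mem_Ico, Finset.mem_Ico]
    exact ⟨⟨h1, h2⟩, ⟨h3, h4⟩⟩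
  have hcard := Finset.card_le_card hsub
  rw [List.toFinset_card_of_nodup hnd] at hcard
  simpa [Finset.card_product, Int.card_Ico] using hcard

theorem pv_loopB (n : Int) (board : List (List Int)) (lo hi : Int) :
    ∀ (k : Nat) (reach : PySem.Set (Int × Int)),
    reach.Nodup →
    (∀ p ∈ reach, pvInb n p) →
    (∀ p ∈ reach, pvReach n board lo hi p) →
    (((0 : Int), (0 : Int)) ∈ reach) →
    n.toNat * n.toNat + 1 ≤ k + reach.length →
    (((0 : Int), (0 : Int)) ∈ altLoop n board lo hi k reach
    ∧ (∀ p ∈ altLoop n board lo hi k reach, pvReach n board lo hi p)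
    ∧ (∀ p ∈ altLoop n board lo hi k reach, ∀ q, pvStep n board lo hi p q →
        q ∈ altLoop n board lo hi k reach)) := by
  intro k
  induction k with
  | zero =>
    intro reach hnd hinb hR hst hk
    exact absurd (pv_card_le n reach hnd hinb) (by omega)
  | succ k ih =>
    intro reach hnd hinb hR hst hk
    by_cases hemp : (altFrontier n board lo hi reach).isEmpty
    · simp only [altLoop, if_pos hemp]
      refine ⟨hst, hR, ?_⟩
      intro p hp q hq
      by_contra hqn
      have hqf : q ∈ altFrontier n board lo hi reach :=
        (pv_frontier_mem n board lo hi reach q).mpr ⟨⟨p, hp, hq.1⟩, hqn, hq.2⟩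
      rw [List.isEmpty_iff] at hemp
      rw [hemp] at hqf
      exact List.not_mem_nil hqf
    · simp only [altLoop, if_neg hemp]
      obtain ⟨x, hx⟩ := List.exists_mem_of_ne_nil (altFrontier n board lo hi reach) (by
        intro hnil
        rw [hnil] at hemp
        exact hemp List.isEmpty_nil)
      have hxprop := (pv_frontier_mem n board lo hi reach x).mp hx
      refine ih (PySem.Set.update reach (altFrontier n board lo hi reach))
        (PySem.Set.nodup_update _ _ hnd) ?_ ?_ ?_ ?_
      · intro p hp
        rcases (PySem.Set.mem_update _ _ _).mp hp with h | h
        · exact hinb p h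
        · exact ((pv_frontier_mem n board lo hi reach p).mp h).2.2.1
      · intro p hp
        rcases (PySem.Set.mem_update _ _ _).mp hp with h | h
        · exact hR p h
        · obtain ⟨⟨p0, hp0, hadj⟩, _, hokp⟩ := (pv_frontier_mem n board lo hi reach p).mp h
          exact Relation.ReflTransGen.tail (hR p0 hp0) ⟨hadj, hokp⟩
      · exact (PySem.Set.mem_update _ _ _).mpr (Or.inl hst)
      · have hgrow : reach.length + 1 ≤ (PySem.Set.update reach (altFrontier n board lo hi reach)).length := by
          rw [PySem.Set.update_eq_append_filter]
          have hxf : x ∈ (PySem.Set.ofList (altFrontier n board lo hi reach)).filter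
              (fun y => !reach.contains y) := by
            rw [List.mem_filter]
            refine ⟨(PySem.Set.mem_ofList _ _).mpr hx, ?_⟩
            rw [Bool.not_eq_true']
            rcases Bool.eq_false_or_eq_true (reach.contains x) with ht | hf
            · exact absurd ((PySem.Set.contains_iff reach x).mp ht) hxprop.2.1
            · exact hf
          have hne := List.ne_nil_of_mem hxf
          have hpos := List.length_pos_of_ne_nil hne
          rw [List.length_append]
          omega
        omega

theorem pv_bfsB (n : Int) (board : List (List Int)) (lo hi : Int) (hn : 1 ≤ n)
    (hok : lo ≤ pvCell board 0 0 ∧ pvCell board 0 0 ≤ hi) :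
    (bfs_alt n board lo hi = true ↔ pvReach n board lo hi (n - 1, n - 1)) := by
  rw [bfs_alt, if_pos hok]
  have hinit : PySem.Set.ofList [((0 : Int), (0 : Int))] = [((0 : Int), (0 : Int))] :=
    PySem.Set.ofList_eq_self_of_nodup _ (List.nodup_singleton _)
  have hnn : (n * n).toNat = n.toNat * n.toNat := by
    have h0 : (0 : Int) ≤ n := by omega
    rw [← Int.toNat_of_nonneg h0, ← Nat.cast_mul, Int.toNat_natCast, Int.toNat_natCast]
  obtain ⟨hstart, hR, hcl⟩ := pv_loopB n board lo hi (n * n).toNat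
    (PySem.Set.ofList [((0 : Int), (0 : Int))])
    (PySem.Set.nodup_ofList _)
    (by
      intro p hp
      rw [hinit, List.mem_singleton] at hp
      subst hp
      exact ⟨le_rfl, by omega, le_rfl, by omega⟩)
    (by
      intro p hp
      rw [hinit, List.mem_singleton] at hp
      subst hp
      exact Relation.ReflTransGen.refl)
    (by rw [hinit]; exact List.mem_singleton.mpr rfl)
    (by rw [hinit, hnn]; simp)
  constructor
  · intro hc
    exact hR _ ((PySem.Set.contains_iff _ _).mp hc)
  · intro hre
    apply (PySem.Set.contains_iff _ _).mpr
    have hall : ∀ p, pvReach n board lo hi p →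
        p ∈ altLoop n board lo hi (n * n).toNat (PySem.Set.ofList [((0 : Int), (0 : Int))]) := by
      intro p hp
      induction hp with
      | refl => exact hstart
      | tail hab hbc ihab => exact hcl _ ihab _ hbc
    exact hall _ hre

-- ===== VERDICT =====
theorem bfs_spec : Claim_equal_bfs := by
  intro n board lo hi hDom hPre
  unfold Spec_bfs
  by_cases hok : lo ≤ pvCell board 0 0 ∧ pvCell board 0 0 ≤ hi
  · have hn : 1 ≤ n := (hPre.2.2 hok).1
    have hA := pv_bfsA n board lo hi hn hok
    have hB := pv_bfsB n board lo hi hn hok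
    have hiff : (bfs n board lo hi = true) ↔ (bfs_alt n board lo hi = true) := hA.trans hB.symm
    rcases Bool.eq_false_or_eq_true (bfs n board lo hi) with h1 | h1 <;>
      rcases Bool.eq_false_or_eq_true (bfs_alt n board lo hi) with h2 | h2 <;>
      simp_all
  · rw [bfs, if_neg hok, bfs_alt, if_neg hok]
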